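-- pv_equiv track=rewrite | github.com/Lister224/Project | backend_app/forecast_api/forecast.py | generate_future_seasons
-- ===== SOURCE A (Python) =====
-- def generate_future_seasons(current_seasons, num_future=3):
--     last_season = current_seasons[-1]
--     year, quarter = int(last_season[:4]), int(last_season[-1])
--
--     future_seasons = []
--     for _ in range(num_future):
--         quarter += 1
--         if quarter > 4:
--             quarter = 1
--             year += 1
--         future_seasons.append(f"{year}Q{quarter}")
--     return future_seasons
-- ===== SOURCE B (Python) =====
-- def generate_future_seasons(current_seasons, num_future=3):
--     last_season = current_seasons[-1]
--     year, quarter = int(last_season[:4]), int(last_season[-1])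
--     # normalize once: index of the first future quarter
--     if quarter >= 4:
--         year, quarter = year + 1, 1
--     else:
--         quarter += 1
--     base = year * 4 + quarter - 1
--     return [f"{(base + i) // 4}Q{(base + i) % 4 + 1}" for i in range(num_future)]
-- ===== Notes on version B (the rewrite author's own statement) =====
-- stated objective: simpler
-- what changed: Replaces the per-iteration carry branch and mutable (year, quarter) loop state with a single normalization step plus a closed-form divmod on an absolute quarter index inside a comprehension.
import Mathlib
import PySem

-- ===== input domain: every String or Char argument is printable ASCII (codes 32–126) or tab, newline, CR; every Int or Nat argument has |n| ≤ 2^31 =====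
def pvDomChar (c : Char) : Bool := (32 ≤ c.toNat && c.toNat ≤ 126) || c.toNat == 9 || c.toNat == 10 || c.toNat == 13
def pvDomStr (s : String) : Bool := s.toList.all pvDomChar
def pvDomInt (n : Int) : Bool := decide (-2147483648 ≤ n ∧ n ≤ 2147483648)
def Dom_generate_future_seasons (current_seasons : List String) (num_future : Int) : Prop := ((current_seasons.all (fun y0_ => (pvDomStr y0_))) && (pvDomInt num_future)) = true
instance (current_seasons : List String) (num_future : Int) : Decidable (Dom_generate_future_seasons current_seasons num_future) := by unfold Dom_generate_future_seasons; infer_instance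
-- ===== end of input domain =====

-- B replaces A's per-iteration carry branch on mutable (year, quarter) state with a one-off
-- normalization plus a closed-form divmod on an absolute quarter index (objective: simpler; same cost).


-- ===== PORT A =====
-- f"{year}Q{quarter}"
def pvFmt (year quarter : Int) : String :=
  PySem.Int.toStr year ++ "Q" ++ PySem.Int.toStr quarter

-- the body of A's for-loop (state: year, quarter, future_seasons); the loop variable is ignored
def pvStepA (st : Int × Int × List String) (_ : Int) : Int × Int × List String :=
  let q := st.2.1 + 1
  if 4 < q then (st.1 + 1, 1, st.2.2 ++ [pvFmt (st.1 + 1) 1])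
  else (st.1, q, st.2.2 ++ [pvFmt st.1 q])

-- port of A; 'last_season[:4]' is List.take 4 (exact for a non-negative stop); parse failures
-- (Python raises there) return [] and are excluded by Pre_
def generate_future_seasons (current_seasons : List String) (num_future : Int) : List String :=
  match PySem.List.pyGet? current_seasons (-1) with
  | none => []
  | some last_season =>
    match PySem.Int.ofChars? (last_season.toList.take 4),
          PySem.Chars.pyGet? last_season.toList (-1) with
    | some year, some c =>
      match PySem.Int.ofChars? [c] with
      | some quarter =>
        ((PySem.List.pyRange 0 num_future 1).foldl pvStepA (year, quarter, [])).2.2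
      | none => []
    | _, _ => []

-- ===== PORT B =====
-- guards written with Option.bind/getD (where Python B would raise, outside Pre_, it yields [])
def generate_future_seasons_alt (current_seasons : List String) (num_future : Int) : List String :=
  ((PySem.List.pyGet? current_seasons (-1)).bind (fun last_season =>
    (PySem.Int.ofChars? (last_season.toList.take 4)).bind (fun year =>
      (PySem.Chars.pyGet? last_season.toList (-1)).bind (fun c =>
        (PySem.Int.ofChars? [c]).map (fun quarter =>
          let p := if 4 ≤ quarter then (year + 1, 1) else (year, quarter + 1)
          let base := p.1 * 4 + p.2 - 1
          (PySem.List.pyRange 0 num_future 1).map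
            (fun i => PySem.Int.toStr (PySem.Int.floordiv ((base + i)) 4) ++ "Q" ++
                      PySem.Int.toStr (PySem.Int.mod (base + i) 4 + 1))))))).getD []

-- ===== PRECONDITION & SPEC =====
-- Pre_: the list and its last string are nonempty, the last string's first ≤4 chars parse as an int
-- and its last char is a decimal digit — exactly where Python A returns instead of raising
-- IndexError/ValueError (on the printable-ASCII domain, int(c) of one char succeeds iff c is a digit).
def Pre_generate_future_seasons (current_seasons : List String) (num_future : Int) : Prop :=
  (match PySem.List.pyGet? current_seasons (-1) with
   | none => false
   | some last_season =>
     match PySem.Chars.pyGet? last_season.toList (-1) with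
     | none => false
     | some c => (PySem.Int.ofChars? (last_season.toList.take 4)).isSome && c.isDigit) = true
instance (current_seasons : List String) (num_future : Int) : Decidable (Pre_generate_future_seasons current_seasons num_future) := by unfold Pre_generate_future_seasons; infer_instance

def pvWitness_generate_future_seasons : List String × Int := (["2023Q4"], 3)

def Spec_generate_future_seasons (current_seasons : List String) (num_future : Int) (out : List String) : Prop := out = generate_future_seasons_alt current_seasons num_future
instance (current_seasons : List String) (num_future : Int) (out : List String) : Decidable (Spec_generate_future_seasons current_seasons num_future out) := by unfold Spec_generate_future_seasons; infer_instance

-- ===== CLAIM (what is proved, stated in full; the proofs are below) =====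
def Claim_equal_generate_future_seasons : Prop := ∀ (current_seasons : List String) (num_future : Int), Dom_generate_future_seasons current_seasons num_future → Pre_generate_future_seasons current_seasons num_future → Spec_generate_future_seasons current_seasons num_future (generate_future_seasons current_seasons num_future)

-- ===== LEMMAS AND PROOFS =====

lemma pvCharEq (c d : Char) (h : c.toNat = d.toNat) : c = d := by
  apply Char.ext; exact UInt32.toNat_inj.mp h

-- int(c) for a single decimal-digit character, with the value's bounds
lemma pvOfChars_digit (c : Char) (h : c.isDigit = true) :
    PySem.Int.ofChars? [c] = some ((c.toNat : Int) - 48) ∧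
      0 ≤ (c.toNat : Int) - 48 ∧ (c.toNat : Int) - 48 ≤ 9 := by
  simp [Char.isDigit] at h
  have h1 : 48 ≤ c.toNat := by simpa using UInt32.le_iff_toNat_le.mp h.1
  have h2 : c.toNat ≤ 57 := by simpa using UInt32.le_iff_toNat_le.mp h.2
  refine ⟨?_, by omega, by omega⟩
  have : c.toNat = 48 ∨ c.toNat = 49 ∨ c.toNat = 50 ∨ c.toNat = 51 ∨ c.toNat = 52 ∨
      c.toNat = 53 ∨ c.toNat = 54 ∨ c.toNat = 55 ∨ c.toNat = 56 ∨ c.toNat = 57 := by omega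
  rcases this with h' | h' | h' | h' | h' | h' | h' | h' | h' | h' <;>
    [ (have hc := pvCharEq c '0' (by rw [h']; decide));
      (have hc := pvCharEq c '1' (by rw [h']; decide));
      (have hc := pvCharEq c '2' (by rw [h']; decide));
      (have hc := pvCharEq c '3' (by rw [h']; decide));
      (have hc := pvCharEq c '4' (by rw [h']; decide));
      (have hc := pvCharEq c '5' (by rw [h']; decide));
      (have hc := pvCharEq c '6' (by rw [h']; decide));
      (have hc := pvCharEq c '7' (by rw [h']; decide));
      (have hc := pvCharEq c '8' (by rw [h']; decide));
      (have hc := pvCharEq c '9' (by rw [h']; decide))] <;>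
    subst hc <;> decide

-- recover (year, quarter) from the absolute quarter index 4*y + q - 1 when 1 ≤ q ≤ 4
lemma pvDivmod (y q : Int) (h1 : 1 ≤ q) (h2 : q ≤ 4) :
    PySem.Int.floordiv (4 * y + q - 1) 4 = y ∧ PySem.Int.mod (4 * y + q - 1) 4 + 1 = q := by
  rw [PySem.Int.floordiv_eq_ediv_of_pos (by norm_num), PySem.Int.mod_eq_emod_of_pos (by norm_num)]
  omega

-- one iteration of A's loop from any state with -1 ≤ q: a normalized successor state
lemma pvStepA_eq (y q : Int) (acc : List String) (e : Int) (h0 : 0 ≤ q) :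
    ∃ y' q', pvStepA (y, q, acc) e = (y', q', acc ++ [pvFmt y' q']) ∧
      1 ≤ q' ∧ (q ≤ 4 → q' ≤ 4) ∧ 4 * y' + q' = if 4 ≤ q then 4 * (y + 1) + 1 else 4 * y + q + 1 := by
  by_cases h4 : 4 ≤ q
  · exact ⟨y + 1, 1, by simp [pvStepA]; omega,
      by omega, fun _ => by omega, by rw [if_pos h4]⟩
  · exact ⟨y, q + 1, by simp [pvStepA]; omega,
      by omega, fun _ => by omega, by rw [if_neg h4]; ring⟩

-- A's loop from a normalized state (1 ≤ q ≤ 4) emits the labels of indices 4y+q, 4y+q+1, …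
lemma pvLoopInv (l : List Int) : ∀ (y q : Int) (acc : List String), 1 ≤ q → q ≤ 4 →
    (l.foldl pvStepA (y, q, acc)).2.2 =
      acc ++ (List.range l.length).map
        (fun (j : Nat) => pvFmt (PySem.Int.floordiv (4 * y + q + (j : Int)) 4)
                        (PySem.Int.mod (4 * y + q + (j : Int)) 4 + 1)) := by
  induction l with
  | nil => intro y q acc h1 h2; simp
  | cons e l ih =>
    intro y q acc h1 h2
    rw [List.foldl_cons]
    obtain ⟨y', q', he, h1', h2', hy⟩ := pvStepA_eq y q acc e (by omega)
    have hsucc : 4 * y' + q' = 4 * y + q + 1 := by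
      by_cases h4 : 4 ≤ q
      · rw [if_pos h4] at hy; omega
      · rw [if_neg h4] at hy; omega
    rw [he, ih y' q' _ h1' (h2' h2)]
    simp only [List.length_cons, List.range_succ_eq_map, List.map_cons, List.map_map,
      List.append_assoc, List.singleton_append]
    obtain ⟨hd, hm⟩ := pvDivmod y' q' h1' (h2' h2)
    rw [show (4 : Int) * y + q + ((0 : Nat) : Int) = 4 * y' + q' - 1 by push_cast; omega,
      hd, hm]
    congr 1
    congr 1
    apply List.map_congr_left; intro j _
    simp only [Function.comp_apply]
    rw [show (4 : Int) * y + q + ((j.succ : Nat) : Int) = 4 * y' + q' + (j : Int) by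
      push_cast; omega]

-- the common finish: A's loop after its first (normalizing) iteration vs B's per-index labels
lemma pvAligned (n y1 q1 b : Int) (h1 : 1 ≤ q1) (h2 : q1 ≤ 4)
    (hb : b = y1 * 4 + q1 - 1) :
    ((PySem.List.pyRange 1 n 1).foldl pvStepA (y1, q1, [pvFmt y1 q1])).2.2 =
      pvFmt (PySem.Int.floordiv b 4) (PySem.Int.mod b 4 + 1) ::
        (PySem.List.pyRange 1 n 1).map
          (fun i => pvFmt (PySem.Int.floordiv (b + i) 4) (PySem.Int.mod (b + i) 4 + 1)) := by
  rw [pvLoopInv (PySem.List.pyRange 1 n 1) y1 q1 _ h1 h2, List.singleton_append]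
  obtain ⟨hd, hm⟩ := pvDivmod y1 q1 h1 h2
  congr 1
  · rw [hb, show y1 * 4 + q1 - 1 = 4 * y1 + q1 - 1 by ring, hd, hm]
  · rw [PySem.List.length_pyRange_one, PySem.List.pyRange_one 1 n, List.map_map]
    apply List.map_congr_left; intro j _
    simp only [Function.comp_apply]
    rw [hb, show y1 * 4 + q1 - 1 + (1 + (j : Int)) = 4 * y1 + q1 + (j : Int) by ring]

-- ===== VERDICT (by name: the statement is the Claim_ definition above) =====
theorem generate_future_seasons_spec : Claim_equal_generate_future_seasons := by
  intro cs n _ hpre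
  unfold Spec_generate_future_seasons
  unfold Pre_generate_future_seasons at hpre
  unfold generate_future_seasons generate_future_seasons_alt
  obtain ⟨s, hlast⟩ : ∃ s, PySem.List.pyGet? cs (-1) = some s := by
    cases h : PySem.List.pyGet? cs (-1) with
    | none => rw [h] at hpre; simp at hpre
    | some s => exact ⟨s, rfl⟩
  simp only [hlast] at hpre ⊢
  obtain ⟨c, hc⟩ : ∃ c, PySem.Chars.pyGet? s.toList (-1) = some c := by
    cases h : PySem.Chars.pyGet? s.toList (-1) with
    | none => rw [h] at hpre; simp at hpre
    | some c => exact ⟨c, rfl⟩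
  simp only [hc] at hpre ⊢
  simp only [Bool.and_eq_true] at hpre
  obtain ⟨hy4, hdig⟩ := hpre
  obtain ⟨year, hyear⟩ : ∃ y, PySem.Int.ofChars? (s.toList.take 4) = some y := by
    cases h : PySem.Int.ofChars? (s.toList.take 4) with
    | none => rw [h] at hy4; simp at hy4
    | some y => exact ⟨y, rfl⟩
  obtain ⟨hq, hq0, hq9⟩ := pvOfChars_digit c hdig
  simp only [hc, hyear, hq, Option.bind_some, Option.map_some, Option.getD_some]
  by_cases hn : 0 < n
  · rw [PySem.List.pyRange_one_cons hn, List.foldl_cons, List.map_cons]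
    simp only [zero_add, add_zero]
    by_cases h4 : 4 ≤ ((c.toNat : Int) - 48)
    · have hstep : pvStepA (year, (c.toNat : Int) - 48, []) 0 =
          (year + 1, 1, [pvFmt (year + 1) 1]) := by
        simp [pvStepA]; omega
      rw [hstep, if_pos h4]
      exact pvAligned n (year + 1) 1 _ (by omega) (by omega) rfl
    · have hstep : pvStepA (year, (c.toNat : Int) - 48, []) 0 =
          (year, (c.toNat : Int) - 48 + 1,
            [pvFmt year ((c.toNat : Int) - 48 + 1)]) := by
        simp [pvStepA]; omega
      rw [hstep, if_neg h4]
      exact pvAligned n year ((c.toNat : Int) - 48 + 1) _ (by omega) (by omega) rfl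
  · rw [PySem.List.pyRange_one_eq_nil (by omega)]
    simp
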